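-- pv_equiv track=rewrite | github.com/AlJohri/practice | pramp/DroneFlightPlanner/code.py | calcFuelBasic
-- ===== SOURCE A (Python) =====
-- def calcFuelBasic(zroute):
--    energy_balance = 0
--    initial_bottles = 0
--    for i in range(1, len(zroute)):
--       energy_balance += zroute[i-1] - zroute[i]
--       if energy_balance < 0:
--          initial_bottles += abs(energy_balance)
--    return initial_bottles
-- ===== SOURCE B (Python) =====
-- def calcFuelBasic(zroute):
--     if not zroute:
--         return 0
--     base = zroute[0]
--     return sum(z - base for z in zroute[1:] if z > base)
-- ===== Notes on version B (the rewrite author's own statement) =====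
-- stated objective: simpler
-- what changed: The running energy_balance telescopes to the first altitude minus the current one, so the index loop with mutable balance/bottles state is replaced by a single base-relative comprehension sum of the excess of each later altitude over the first.
import Mathlib
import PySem

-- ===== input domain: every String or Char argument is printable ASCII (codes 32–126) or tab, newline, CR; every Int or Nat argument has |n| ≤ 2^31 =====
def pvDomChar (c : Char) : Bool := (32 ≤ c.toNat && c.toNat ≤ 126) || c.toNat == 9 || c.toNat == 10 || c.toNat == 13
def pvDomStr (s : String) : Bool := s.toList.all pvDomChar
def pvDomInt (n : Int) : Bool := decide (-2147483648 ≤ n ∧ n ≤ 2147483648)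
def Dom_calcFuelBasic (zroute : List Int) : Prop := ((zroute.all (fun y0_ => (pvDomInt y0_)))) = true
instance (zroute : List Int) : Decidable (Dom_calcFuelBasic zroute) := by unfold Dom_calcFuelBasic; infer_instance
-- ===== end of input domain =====

-- B replaces A's running energy_balance/bottles index loop by a single base-relative sum
-- of the excess of each later altitude over the first (objective: simpler).


-- ===== PORT A =====
-- for i in range(1, len(zroute)): energy_balance += zroute[i-1] - zroute[i]; if < 0: bottles += abs(...)
-- indices i-1, i are always in range, so pyGetD's default 0 is never used.
def calcFuelBasic (zroute : List Int) : Int :=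
  ((PySem.List.pyRange 1 (zroute.length : Int)).foldl
    (fun s i =>
      let eb := s.1 + (PySem.List.pyGetD zroute (i - 1) 0 - PySem.List.pyGetD zroute i 0)
      (eb, if eb < 0 then s.2 + |eb| else s.2))
    (0, 0)).2

-- ===== PORT B =====
-- if not zroute: return 0; base = zroute[0]; sum(z - base for z in zroute[1:] if z > base)
def calcFuelBasic_alt (zroute : List Int) : Int :=
  match zroute with
  | [] => 0
  | base :: rest => ((rest.filter (fun z => base < z)).map (fun z => z - base)).sum

-- ===== PRECONDITION & SPEC =====
def Spec_calcFuelBasic (zroute : List Int) (out : Int) : Prop := out = calcFuelBasic_alt zroute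
instance (zroute : List Int) (out : Int) : Decidable (Spec_calcFuelBasic zroute out) := by unfold Spec_calcFuelBasic; infer_instance

-- ===== CLAIM (what is proved, stated in full; the proofs are below) =====
def Claim_equal_calcFuelBasic : Prop := ∀ (zroute : List Int), Dom_calcFuelBasic zroute → Spec_calcFuelBasic zroute (calcFuelBasic zroute)

-- ===== LEMMAS AND PROOFS =====

-- loop invariant: after the indices 1 .. rest.length, the state is
-- (z0 - last altitude, sum of base-relative excesses)
theorem calcFuelBasic_loop (z0 : Int) (rest : List Int) :
    ((PySem.List.pyRange 1 (1 + (rest.length : Int))).foldl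
      (fun s i =>
        let eb := s.1 + (PySem.List.pyGetD (z0 :: rest) (i - 1) 0 - PySem.List.pyGetD (z0 :: rest) i 0)
        (eb, if eb < 0 then s.2 + |eb| else s.2))
      ((0 : Int), (0 : Int))) =
    (z0 - PySem.List.pyGetD (z0 :: rest) (rest.length : Int) 0,
     ((rest.filter (fun z => z0 < z)).map (fun z => z - z0)).sum) := by
  induction rest using List.reverseRecOn with
  | nil =>
    simp [PySem.List.pyRange_one_eq_nil (by norm_num : (1:Int) ≤ 1)]
  | append_singleton xs z ih =>
    have hlen : (((xs ++ [z]).length : Int)) = (1 + (xs.length : Int)) := by simp; ring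
    rw [hlen]
    rw [show (1 : Int) + (1 + (xs.length : Int)) = (1 + (xs.length : Int)) + 1 by ring]
    rw [PySem.List.pyRange_one_succ_right (by omega)]
    rw [List.foldl_append]
    -- congruence on the prefix: indices j ∈ [1, 1+xs.length) only touch z0 :: xs
    have hcongr := PySem.List.foldl_congr_mem (PySem.List.pyRange 1 (1 + (xs.length : Int)))
        (fun s i =>
          let eb := s.1 + (PySem.List.pyGetD (z0 :: (xs ++ [z])) (i - 1) 0 - PySem.List.pyGetD (z0 :: (xs ++ [z])) i 0)
          (eb, if eb < 0 then s.2 + |eb| else s.2))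
        (fun s i =>
          let eb := s.1 + (PySem.List.pyGetD (z0 :: xs) (i - 1) 0 - PySem.List.pyGetD (z0 :: xs) i 0)
          (eb, if eb < 0 then s.2 + |eb| else s.2))
        ((0 : Int), (0 : Int)) ?_
    · rw [hcongr, ih]
      have hgd : ∀ (j : Int), 0 ≤ j → j ≤ (xs.length : Int) →
          PySem.List.pyGetD (z0 :: (xs ++ [z])) j 0 = PySem.List.pyGetD (z0 :: xs) j 0 := by
        intro j h0 h1
        rw [PySem.List.pyGetD_of_nonneg _ _ h0, PySem.List.pyGetD_of_nonneg _ _ h0]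
        rcases j.toNat.eq_zero_or_pos with h | h
        · simp [h]
        · have : j.toNat - 1 < xs.length := by omega
          simp [List.getD, List.getElem?_cons, List.getElem?_append, this]
      simp only [List.foldl_cons, List.foldl_nil]
      have e1 : (1 : Int) + (xs.length : Int) - 1 = (xs.length : Int) := by ring
      rw [e1, hgd _ (by omega) (by omega)]
      have e2 : PySem.List.pyGetD (z0 :: (xs ++ [z])) (1 + (xs.length : Int)) 0 = z := by
        rw [PySem.List.pyGetD_of_nonneg _ _ (by omega)]
        have h3 : (1 + (xs.length : Int)).toNat = xs.length + 1 := by omega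
        simp [h3, List.getD]
      rw [e2]
      set p := PySem.List.pyGetD (z0 :: xs) ((xs.length : Int)) 0 with hp
      have e3 : z0 - p + (p - z) = z0 - z := by ring
      rw [e3]
      simp only [List.filter_append, List.map_append, List.sum_append]
      by_cases h : z0 < z
      · simp [h, show z0 - z < 0 by omega, abs_of_neg (show z0 - z < 0 by omega)]
      · simp [h, show ¬ (z0 - z < 0) by omega]
    · intro acc x hx
      rw [PySem.List.mem_pyRange_one] at hx
      have hgd2 : ∀ (j : Int), 0 ≤ j → j ≤ (xs.length : Int) →
          PySem.List.pyGetD (z0 :: (xs ++ [z])) j 0 = PySem.List.pyGetD (z0 :: xs) j 0 := by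
        intro j h0 h1
        rw [PySem.List.pyGetD_of_nonneg _ _ h0, PySem.List.pyGetD_of_nonneg _ _ h0]
        rcases j.toNat.eq_zero_or_pos with h | h
        · simp [h]
        · have : j.toNat - 1 < xs.length := by omega
          simp [List.getD, List.getElem?_cons, List.getElem?_append, this]
      simp only [show (PySem.List.pyGetD (z0 :: (xs ++ [z])) (x - 1) 0) = PySem.List.pyGetD (z0 :: xs) (x - 1) 0 from hgd2 (x-1) (by omega) (by omega), show (PySem.List.pyGetD (z0 :: (xs ++ [z])) x 0) = PySem.List.pyGetD (z0 :: xs) x 0 from hgd2 x (by omega) (by omega)]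


theorem calcFuelBasic_spec : Claim_equal_calcFuelBasic := by
  intro zroute _
  unfold Spec_calcFuelBasic
  cases zroute with
  | nil => rfl
  | cons z0 rest =>
    unfold calcFuelBasic calcFuelBasic_alt
    have h : ((z0 :: rest).length : Int) = 1 + (rest.length : Int) := by
      simp; ring
    rw [h, calcFuelBasic_loop]
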